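-- pv_equiv track=rewrite | github.com/DeepRatAI/cortex-knowledge-assistant | src/cortex_ka/application/rag_service.py | _is_full_list_request
-- ===== SOURCE A (Python) =====
-- def _is_full_list_request(query: str) -> bool:
--     """Detect if the user explicitly requests a full/complete list or enumeration.
--
--     This helps the RAG pipeline relax selection limits and instruct the LLM
--     to return an explicit enumerated list instead of a short summary.
--     """
--     if not query:
--         return False
--     q = query.lower()
--     patterns = [
--         "toda la lista",
--         "lista completa",
--         "todas las",
--         "toda la",
--         "enumerame",
--         "enumera",
--         "enumerar",
--         "dame la lista",
--         "dame toda la lista",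
--         "listar",
--         "toda lista",
--         "la lista completa",
--     ]
--     return any(p in q for p in patterns)
-- ===== SOURCE B (Python) =====
-- # Seven substring-minimal patterns: every original pattern contains one of these,
-- # so matching them is equivalent to matching the original twelve.
-- _PATS = (
--     "todas las",
--     "toda la",
--     "toda lista",
--     "lista completa",
--     "enumera",
--     "dame la lista",
--     "listar",
-- )
--
--
-- def _starts(q, i, p):
--     """Char-by-char test: does the suffix of q at position i start with pattern p?"""
--     for c in p:
--         if i >= len(q) or q[i] != c:
--             return False
--         i += 1
--     return True
--
--
-- def _is_full_list_request(query: str) -> bool: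
--     """Detect if the user explicitly requests a full/complete list or enumeration.
--
--     Explicit suffix scan: advance a position through the lowercased query one
--     character at a time, testing at each suffix whether some minimal pattern
--     starts there, with a hand-written char-by-char comparison.
--     """
--     if not query:
--         return False
--     q = query.lower()
--     for i in range(len(q)):
--         for p in _PATS:
--             if _starts(q, i, p):
--                 return True
--     return False
-- ===== Notes on version B (the rewrite author's own statement) =====
-- stated objective: alternative
-- what changed: B reduces the 12 patterns to their 7 substring-minimal elements and replaces the per-pattern library substring searches by an explicit suffix scan: it advances a position through the lowercased query one character at a time and at each suffix does a hand-written char-by-char prefix test against each minimal pattern.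
import Mathlib
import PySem

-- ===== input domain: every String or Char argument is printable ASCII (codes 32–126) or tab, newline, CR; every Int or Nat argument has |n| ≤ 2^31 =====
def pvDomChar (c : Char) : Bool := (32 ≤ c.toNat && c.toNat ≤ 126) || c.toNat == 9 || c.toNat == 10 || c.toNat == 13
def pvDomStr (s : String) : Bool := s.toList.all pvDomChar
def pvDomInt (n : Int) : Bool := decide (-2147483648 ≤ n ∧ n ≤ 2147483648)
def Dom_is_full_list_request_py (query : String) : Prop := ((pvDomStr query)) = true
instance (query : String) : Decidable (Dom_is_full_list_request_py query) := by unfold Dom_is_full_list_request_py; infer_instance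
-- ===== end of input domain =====

-- B replaces A's 12 library substring searches by an explicit suffix scan with a hand-written
-- char-by-char prefix test against the 7 substring-minimal patterns (alternative; same cost class).

-- ===== PORT A =====
def pvPatternsA : List String :=
  ["toda la lista", "lista completa", "todas las", "toda la", "enumerame", "enumera",
   "enumerar", "dame la lista", "dame toda la lista", "listar", "toda lista", "la lista completa"]

def is_full_list_request_py (query : String) : Bool :=
  if query = "" then false
  else
    let q := PySem.Str.lower query
    pvPatternsA.any (fun p => PySem.Str.isIn p q)

-- ===== PORT B =====
def pvPatternsB : List String :=
  ["todas las", "toda la", "toda lista", "lista completa", "enumera", "dame la lista", "listar"]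

-- Source B's _starts: char-by-char recursive prefix test
def pvStarts : List Char → List Char → Bool
  | _, [] => true
  | [], _ :: _ => false
  | c :: q, d :: p => if c ≠ d then false else pvStarts q p

-- Source B's while loop: drop one character at a time, test each suffix
def pvSuffixScan : List Char → Bool
  | [] => false
  | c :: q => if pvPatternsB.any (fun p => pvStarts (c :: q) p.toList) then true else pvSuffixScan q

def is_full_list_request_py_alt (query : String) : Bool :=
  if query = "" then false
  else pvSuffixScan (PySem.Str.lower query).toList

-- ===== PRECONDITION & SPEC =====
def Spec_is_full_list_request_py (query : String) (out : Bool) : Prop := out = is_full_list_request_py_alt query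
instance (query : String) (out : Bool) : Decidable (Spec_is_full_list_request_py query out) := by unfold Spec_is_full_list_request_py; infer_instance

-- ===== CLAIM (what is proved, stated in full; the proofs are below) =====
def Claim_equal_is_full_list_request_py : Prop := ∀ (query : String), Dom_is_full_list_request_py query → Spec_is_full_list_request_py query (is_full_list_request_py query)

-- ===== LEMMAS AND PROOFS =====

-- every original pattern contains a minimal pattern, and vice versa each minimal one is original
theorem pv_cover : ∀ p ∈ pvPatternsA, ∃ m ∈ pvPatternsB, PySem.Chars.isIn m.toList p.toList = true := by decide

theorem pv_sub : ∀ m ∈ pvPatternsB, m ∈ pvPatternsA := by decide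

theorem pv_nonempty : ∀ m ∈ pvPatternsB, m.toList ≠ [] := by decide

theorem pv_starts_iff (p q : List Char) : pvStarts q p = true ↔ p <+: q := by
  induction p generalizing q with
  | nil => simp [pvStarts]
  | cons d p ih =>
    cases q with
    | nil => simp [pvStarts]
    | cons c q =>
      by_cases h : c = d
      · simp [pvStarts, List.cons_prefix_cons, h, ih]
      · simp [pvStarts, List.cons_prefix_cons, h, (Ne.symm h : d ≠ c)]

theorem pv_scan_iff (q : List Char) :
    pvSuffixScan q = true ↔ ∃ m ∈ pvPatternsB, m.toList <:+: q := by
  induction q with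
  | nil =>
    simp only [pvSuffixScan, Bool.false_eq_true, false_iff]
    rintro ⟨m, hm, hinf⟩
    exact pv_nonempty m hm (List.infix_nil.mp hinf)
  | cons c q ih =>
    rw [show pvSuffixScan (c :: q) =
          if pvPatternsB.any (fun p => pvStarts (c :: q) p.toList) then true else pvSuffixScan q
        from rfl]
    by_cases h : pvPatternsB.any (fun p => pvStarts (c :: q) p.toList) = true
    · rw [if_pos h]
      refine ⟨fun _ => ?_, fun _ => rfl⟩
      obtain ⟨m, hm, hs⟩ := List.any_eq_true.mp h
      exact ⟨m, hm, ((pv_starts_iff m.toList (c :: q)).mp hs).isInfix⟩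
    · rw [if_neg h, ih]
      constructor
      · rintro ⟨m, hm, hinf⟩; exact ⟨m, hm, hinf.trans (List.suffix_cons c q).isInfix⟩
      · rintro ⟨m, hm, hinf⟩
        rcases List.infix_cons_iff.mp hinf with hpre | hinf'
        · exact absurd (List.any_eq_true.mpr ⟨m, hm, (pv_starts_iff m.toList (c :: q)).mpr hpre⟩) h
        · exact ⟨m, hm, hinf'⟩

theorem pv_main (q : String) :
    pvPatternsA.any (fun p => PySem.Str.isIn p q) = pvSuffixScan q.toList := by
  apply Bool.eq_iff_iff.mpr
  rw [pv_scan_iff]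
  simp only [List.any_eq_true, PySem.Str.isIn_iff_infix]
  constructor
  · rintro ⟨p, hp, hinf⟩
    obtain ⟨m, hm, hmi⟩ := pv_cover p hp
    exact ⟨m, hm, ((PySem.Chars.isIn_iff_infix m.toList p.toList).mp hmi).trans hinf⟩
  · rintro ⟨m, hm, hinf⟩
    exact ⟨m, pv_sub m hm, hinf⟩

-- ===== VERDICT (by name: the statement is the Claim_ definition above) =====
theorem is_full_list_request_py_spec : Claim_equal_is_full_list_request_py := by
  intro query _
  unfold Spec_is_full_list_request_py is_full_list_request_py is_full_list_request_py_alt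
  split_ifs with h
  · rfl
  · exact pv_main (PySem.Str.lower query)
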